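-- pv_equiv track=rewrite | github.com/ryancole25/AdventOfCode | 2021/Day4/Day4.py | scoring
-- ===== SOURCE A (Python) =====
-- called_numbers = [90,4,2,96,46,1,62,97,3,52,7,35,50,28,31,37,74,26,59,53,82,47,83,80,19,40,68,95,34,55,54,73,12,78,30,63,57,93,72,77,56,91,23,67,64,
--                   79,85,84,76,10,58,0,29,13,94,20,32,25,11,38,89,21,98,92,42,27,14,99,24,75,86,51,22,48,9,33,49,18,70,8,87,61,39,16,66,71,5,69,15,43,88,45,6,81,60,36,44,17,41,65]
--
-- def scoring(player_board, row_scoreboard, column_scoreboard):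
--     # Go through each called number and search if the number is on the bingo card
--     # Save the x,y coordinates of matches in a row_scoreboard and column_scoreboard to check for bingo
--     for num in called_numbers:
--         for i in range(len(player_board)):
--             for j in range(len(player_board[i])):
--                 if player_board[i][j] == str(num):
--                     row_scoreboard[i].append(j)
--                     column_scoreboard[j].append(i)
--                 # If there is a bingo, stop checking
--                 if len(row_scoreboard[i]) == 5 or len(column_scoreboard[j]) == 5:
--                     winning_num = num
--                     return winning_num
-- ===== SOURCE B (Python) =====
-- called_numbers = [90,4,2,96,46,1,62,97,3,52,7,35,50,28,31,37,74,26,59,53,82,47,83,80,19,40,68,95,34,55,54,73,12,78,30,63,57,93,72,77,56,91,23,67,64,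
--                   79,85,84,76,10,58,0,29,13,94,20,32,25,11,38,89,21,98,92,42,27,14,99,24,75,86,51,22,48,9,33,49,18,70,8,87,61,39,16,66,71,5,69,15,43,88,45,6,81,60,36,44,17,41,65]
--
-- # Faster re-implementation: keep integer mark counts per row/column and index the board
-- # once by cell value, so each called number touches only its own matching cells instead of
-- # rescanning the whole board.  Does not mutate row_scoreboard / column_scoreboard.
-- def scoring(player_board, row_scoreboard, column_scoreboard):
--     row_counts = [len(r) for r in row_scoreboard]
--     col_counts = [len(c) for c in column_scoreboard]
--     positions = {}
--     for i, row in enumerate(player_board):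
--         for j, v in enumerate(row):
--             positions.setdefault(v, []).append((i, j))
--     for num in called_numbers:
--         for i, j in positions.get(str(num), []):
--             row_counts[i] += 1
--             col_counts[j] += 1
--             if row_counts[i] == 5 or col_counts[j] == 5:
--                 return num
--     return None
-- ===== Notes on version B (the rewrite author's own statement) =====
-- stated objective: faster
-- what changed: B keeps integer mark-counters instead of A's growing coordinate lists and indexes the board once by cell value, so each of the 100 called numbers touches only its matching cells instead of rescanning the whole board; B does not mutate the scoreboard arguments (return value is what is proved equal). …
-- outside the precondition, e.g. on scoring([['x']], [[1, 2, 3, 4, 5]], [[]]): A returns 90, B returns None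
import Mathlib
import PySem

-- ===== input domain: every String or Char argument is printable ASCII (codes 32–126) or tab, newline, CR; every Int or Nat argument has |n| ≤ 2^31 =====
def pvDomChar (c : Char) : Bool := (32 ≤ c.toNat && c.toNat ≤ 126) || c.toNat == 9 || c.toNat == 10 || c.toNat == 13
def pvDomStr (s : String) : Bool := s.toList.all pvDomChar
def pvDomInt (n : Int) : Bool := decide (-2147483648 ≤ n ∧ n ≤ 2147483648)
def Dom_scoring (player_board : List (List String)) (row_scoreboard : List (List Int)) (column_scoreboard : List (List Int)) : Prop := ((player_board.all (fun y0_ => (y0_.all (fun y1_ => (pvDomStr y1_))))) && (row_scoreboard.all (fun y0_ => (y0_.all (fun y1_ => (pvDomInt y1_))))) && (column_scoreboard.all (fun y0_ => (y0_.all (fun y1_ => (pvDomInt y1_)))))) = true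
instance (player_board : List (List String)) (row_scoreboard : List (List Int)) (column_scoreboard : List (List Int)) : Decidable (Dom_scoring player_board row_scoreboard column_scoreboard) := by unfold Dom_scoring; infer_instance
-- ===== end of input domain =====

-- B replaces A's 100 full-board rescans by integer mark-counters and a value→positions
-- index built once, so each called number touches only its matching cells (objective:
-- faster).  A mutates row_scoreboard/column_scoreboard in place, B does not: the
-- equivalence proved here is about the RETURN value only.

-- the module constant called_numbers
def pvCalled : List Int := [90,4,2,96,46,1,62,97,3,52,7,35,50,28,31,37,74,26,59,53,82,47,83,80,19,40,68,95,34,55,54,73,12,78,30,63,57,93,72,77,56,91,23,67,64,79,85,84,76,10,58,0,29,13,94,20,32,25,11,38,89,21,98,92,42,27,14,99,24,75,86,51,22,48,9,33,49,18,70,8,87,61,39,16,66,71,5,69,15,43,88,45,6,81,60,36,44,17,41,65]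

-- early-returning for-loop: stops with .error at Python's `return`
def pvEFold {σ α : Type} (f : σ → α → Except Int σ) : List α → σ → Except Int σ
  | [], s => .ok s
  | x :: xs, s =>
    match f s x with
    | .error n => .error n
    | .ok s' => pvEFold f xs s'

-- ===== PORT A =====
-- the body of A's inner loop for one cell (i, j); `.getD` is exact inside Pre_scoring
-- (outside it Python raises IndexError)
def pvAStep (pb : List (List String)) (num : Int) (i j : Nat)
    (st : List (List Int) × List (List Int)) : Except Int (List (List Int) × List (List Int)) :=
  let st' :=
    if (pb.getD i []).getD j "" = PySem.Int.toStr num then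
      (st.1.set i (st.1.getD i [] ++ [(j : Int)]), st.2.set j (st.2.getD j [] ++ [(i : Int)]))
    else st
  if (st'.1.getD i []).length = 5 ∨ (st'.2.getD j []).length = 5 then .error num else .ok st'

-- `for i in range(len(player_board)): for j in range(len(player_board[i])): …` for one num
def pvAPass (pb : List (List String)) (num : Int) (st : List (List Int) × List (List Int)) :
    Except Int (List (List Int) × List (List Int)) :=
  pvEFold (fun st i =>
      pvEFold (fun st j => pvAStep pb num i j st) (List.range (pb.getD i []).length) st)
    (List.range pb.length) st

def scoring (player_board : List (List String)) (row_scoreboard : List (List Int)) (column_scoreboard : List (List Int)) : Option Int :=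
  match pvEFold (fun st num => pvAPass player_board num st) pvCalled (row_scoreboard, column_scoreboard) with
  | .error n => some n
  | .ok _ => none

-- ===== PORT B =====
-- `row_counts[i] += 1; col_counts[j] += 1; if row_counts[i] == 5 or col_counts[j] == 5: return num`
def pvMark (num : Int) (st : List Int × List Int) (p : Nat × Nat) :
    Except Int (List Int × List Int) :=
  let st' := (st.1.set p.1 (st.1.getD p.1 0 + 1), st.2.set p.2 (st.2.getD p.2 0 + 1))
  if st'.1.getD p.1 0 = 5 ∨ st'.2.getD p.2 0 = 5 then .error num else .ok st'

-- `positions.setdefault(player_board[i][j], []).append((i, j))` over the whole board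
def pvBuildPos (pb : List (List String)) : PySem.Dict String (List (Nat × Nat)) :=
  (List.range pb.length).foldl (fun d i =>
    (List.range (pb.getD i []).length).foldl (fun d j =>
      d.modify ((pb.getD i []).getD j "") [] (· ++ [(i, j)])) d) PySem.Dict.empty

def scoring_alt (player_board : List (List String)) (row_scoreboard : List (List Int)) (column_scoreboard : List (List Int)) : Option Int :=
  let row_counts := row_scoreboard.map (fun r => (r.length : Int))
  let col_counts := column_scoreboard.map (fun c => (c.length : Int))
  let positions := pvBuildPos player_board
  match pvEFold (fun st num => pvEFold (pvMark num) (positions.getD (PySem.Int.toStr num) []) st)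
      pvCalled (row_counts, col_counts) with
  | .error n => some n
  | .ok _ => none

-- ===== PRECONDITION & SPEC =====
-- Pre_scoring excludes (a) inputs on which A raises IndexError: a visited cell (i, j) with
-- i ≥ len(row_scoreboard) or j ≥ len(column_scoreboard); (b) scoreboards pre-loaded with
-- exactly 5 marks on a row/column the scan touches, on which A declares bingo at the first
-- visited cell without any mark while B requires an actual mark — a corner where either
-- behaviour is defensible (the scoreboards are scratch state, passed empty in the repo).
def Pre_scoring (player_board : List (List String)) (row_scoreboard : List (List Int)) (column_scoreboard : List (List Int)) : Prop :=
  ∀ i < player_board.length,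
    ((player_board.getD i []) ≠ [] →
        i < row_scoreboard.length ∧ (row_scoreboard.getD i []).length ≠ 5) ∧
    (player_board.getD i []).length ≤ column_scoreboard.length ∧
    ∀ j < (player_board.getD i []).length, (column_scoreboard.getD j []).length ≠ 5
instance (player_board : List (List String)) (row_scoreboard : List (List Int)) (column_scoreboard : List (List Int)) : Decidable (Pre_scoring player_board row_scoreboard column_scoreboard) := by unfold Pre_scoring; infer_instance

def pvWitness_scoring : List (List String) × List (List Int) × List (List Int) :=
  ([["90", "x"], ["7", "1"]], [[], []], [[], []])

def Spec_scoring (player_board : List (List String)) (row_scoreboard : List (List Int)) (column_scoreboard : List (List Int)) (out : Option Int) : Prop := out = scoring_alt player_board row_scoreboard column_scoreboard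
instance (player_board : List (List String)) (row_scoreboard : List (List Int)) (column_scoreboard : List (List Int)) (out : Option Int) : Decidable (Spec_scoring player_board row_scoreboard column_scoreboard out) := by unfold Spec_scoring; infer_instance

-- ===== CLAIM (what is proved, stated in full; the proofs are below) =====
def Claim_equal_scoring : Prop := ∀ (player_board : List (List String)) (row_scoreboard : List (List Int)) (column_scoreboard : List (List Int)), Dom_scoring player_board row_scoreboard column_scoreboard → Pre_scoring player_board row_scoreboard column_scoreboard → Spec_scoring player_board row_scoreboard column_scoreboard (scoring player_board row_scoreboard column_scoreboard)

-- ===== LEMMAS AND PROOFS =====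

-- the board's cell coordinates in A's (row-major) visiting order
def pvCells (pb : List (List String)) : List (Nat × Nat) :=
  (List.range pb.length).flatMap (fun i =>
    (List.range (pb.getD i []).length).map (fun j => (i, j)))

-- forget the mark lists, keep their lengths
def pvF (st : List (List Int) × List (List Int)) : List Int × List Int :=
  (st.1.map (fun r => (r.length : Int)), st.2.map (fun c => (c.length : Int)))

-- the counter-level image of one A cell (proof device relating A's step to pvMark)
def pvBStep (pb : List (List String)) (s : String) (out : Int) (i j : Nat)
    (st : List Int × List Int) : Except Int (List Int × List Int) :=
  let st' :=
    if (pb.getD i []).getD j "" = s then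
      (st.1.set i (st.1.getD i 0 + 1), st.2.set j (st.2.getD j 0 + 1))
    else st
  if st'.1.getD i 0 = 5 ∨ st'.2.getD j 0 = 5 then .error out else .ok st'

-- "no counter relevant to cell p sits at 5"
def pvNF (st : List Int × List Int) (p : Nat × Nat) : Prop :=
  st.1.getD p.1 0 ≠ 5 ∧ st.2.getD p.2 0 ≠ 5

-- "each counter is unchanged or ≠ 5"
def pvPres (s s' : List Int × List Int) : Prop :=
  ∀ k : Nat, (s'.1.getD k 0 = s.1.getD k 0 ∨ s'.1.getD k 0 ≠ 5) ∧
             (s'.2.getD k 0 = s.2.getD k 0 ∨ s'.2.getD k 0 ≠ 5)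

theorem pvPres_refl (s : List Int × List Int) : pvPres s s := by
  intro k; exact ⟨Or.inl rfl, Or.inl rfl⟩

theorem pvPres_trans {a b c : List Int × List Int} (h1 : pvPres a b) (h2 : pvPres b c) :
    pvPres a c := by
  intro k
  rcases h1 k with ⟨x1, y1⟩; rcases h2 k with ⟨x2, y2⟩
  constructor
  · rcases x2 with h | h
    · rw [h]; exact x1
    · exact Or.inr h
  · rcases y2 with h | h
    · rw [h]; exact y1
    · exact Or.inr h

theorem pvNF_of_pres {s s' : List Int × List Int} {p : Nat × Nat}
    (hnf : pvNF s p) (hp : pvPres s s') : pvNF s' p := by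
  rcases hp p.1 with ⟨x1, _⟩; rcases hp p.2 with ⟨_, y2⟩
  constructor
  · rcases x1 with h | h
    · rw [h]; exact hnf.1
    · exact h
  · rcases y2 with h | h
    · rw [h]; exact hnf.2
    · exact h

-- getD through map-length
theorem pvGetD_mapLen (R : List (List Int)) (i : Nat) :
    (R.map (fun r => (r.length : Int))).getD i 0 = ((R.getD i []).length : Int) := by
  rcases Nat.lt_or_ge i R.length with h | h
  · simp [List.getD, List.getElem?_map, List.getElem?_eq_getElem h]
  · have h2 : (R.map (fun r => (r.length : Int))).length ≤ i := by simpa using h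
    simp [List.getD, List.getElem?_eq_none_iff.mpr h, List.getElem?_eq_none_iff.mpr h2]

-- set/append through map-length
theorem pvSet_mapLen (R : List (List Int)) (i : Nat) (x : Int) :
    (R.set i (R.getD i [] ++ [x])).map (fun r => (r.length : Int)) =
      (R.map (fun r => (r.length : Int))).set i
        ((R.map (fun r => (r.length : Int))).getD i 0 + 1) := by
  rcases Nat.lt_or_ge i R.length with h | h
  · rw [List.map_set]
    congr 1
    rw [pvGetD_mapLen]
    simp [List.getD, List.getElem?_eq_getElem h]
  · rw [List.set_eq_of_length_le h, List.set_eq_of_length_le (by simpa using h)]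

-- one cell of A, lengths taken: exactly one cell of the counter scan
theorem pvStep_map (pb : List (List String)) (num : Int) (i j : Nat)
    (st : List (List Int) × List (List Int)) :
    (pvAStep pb num i j st).map pvF = pvBStep pb (PySem.Int.toStr num) num i j (pvF st) := by
  obtain ⟨R, C⟩ := st
  by_cases hm : (pb.getD i []).getD j "" = PySem.Int.toStr num
  · simp only [pvAStep, pvBStep, pvF, if_pos hm]
    have hR := pvSet_mapLen R i (j : Int)
    have hC := pvSet_mapLen C j (i : Int)
    have e1 : ((R.map (fun r => (r.length : Int))).set i
        ((R.map (fun r => (r.length : Int))).getD i 0 + 1)).getD i 0 =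
        (((R.set i (R.getD i [] ++ [(j : Int)])).getD i []).length : Int) := by
      rw [← hR, pvGetD_mapLen]
    have e2 : ((C.map (fun c => (c.length : Int))).set j
        ((C.map (fun c => (c.length : Int))).getD j 0 + 1)).getD j 0 =
        (((C.set j (C.getD j [] ++ [(i : Int)])).getD j []).length : Int) := by
      rw [← hC, pvGetD_mapLen]
    by_cases hc : ((R.set i (R.getD i [] ++ [(j : Int)])).getD i []).length = 5 ∨
        ((C.set j (C.getD j [] ++ [(i : Int)])).getD j []).length = 5
    · rw [if_pos hc, if_pos]
      · rfl
      · rcases hc with h | h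
        · exact Or.inl (by rw [e1, h]; rfl)
        · exact Or.inr (by rw [e2, h]; rfl)
    · rw [if_neg hc, if_neg]
      · simp only [Except.map, pvF]
        rw [hR, hC]
      · rintro (h | h)
        · exact hc (Or.inl (by rw [e1] at h; exact_mod_cast h))
        · exact hc (Or.inr (by rw [e2] at h; exact_mod_cast h))
  · simp only [pvAStep, pvBStep, pvF, if_neg hm]
    by_cases hc : (R.getD i []).length = 5 ∨ (C.getD j []).length = 5
    · rw [if_pos hc, if_pos]
      · rfl
      · rcases hc with h | h
        · exact Or.inl (by rw [pvGetD_mapLen, h]; rfl)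
        · exact Or.inr (by rw [pvGetD_mapLen, h]; rfl)
    · rw [if_neg hc, if_neg]
      · rfl
      · rintro (h | h)
        · exact hc (Or.inl (by rw [pvGetD_mapLen] at h; exact_mod_cast h))
        · exact hc (Or.inr (by rw [pvGetD_mapLen] at h; exact_mod_cast h))

-- mapping a state abstraction through an early-returning loop
theorem pvEFold_map {σ τ α : Type} (F : σ → τ) (fA : σ → α → Except Int σ)
    (fB : τ → α → Except Int τ) (h : ∀ s x, (fA s x).map F = fB (F s) x)
    (L : List α) (s : σ) :
    (pvEFold fA L s).map F = pvEFold fB L (F s) := by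
  induction L generalizing s with
  | nil => rfl
  | cons x xs ih =>
    have hx := h s x
    simp only [pvEFold]
    cases hfa : fA s x with
    | error n => rw [hfa] at hx; simp [Except.map] at hx; rw [← hx]; rfl
    | ok s' =>
      rw [hfa] at hx; simp [Except.map] at hx
      cases hfb : fB (F s) x with
      | error n => rw [hfb] at hx; simp at hx
      | ok t' => rw [hfb] at hx; simp at hx; rw [← hx]; exact ih s'

theorem pvEFold_append {σ α : Type} (f : σ → α → Except Int σ) (l1 l2 : List α) (s : σ) :
    pvEFold f (l1 ++ l2) s =
      match pvEFold f l1 s with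
      | .error n => .error n
      | .ok s' => pvEFold f l2 s' := by
  induction l1 generalizing s with
  | nil => rfl
  | cons x xs ih =>
    simp only [List.cons_append, pvEFold]
    cases f s x with
    | error n => rfl
    | ok s' => exact ih s'

theorem pvEFold_mapList {σ α β : Type} (f : σ → α → Except Int σ) (g : β → α)
    (l : List β) (s : σ) :
    pvEFold f (l.map g) s = pvEFold (fun s y => f s (g y)) l s := by
  induction l generalizing s with
  | nil => rfl
  | cons x xs ih =>
    simp only [List.map_cons, pvEFold]
    cases f s (g x) with
    | error n => rfl
    | ok s' => exact ih s'

-- nested loops = one loop over the flattened pair list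
theorem pvEFold_flat {σ α β : Type} (g : α → σ → β → Except Int σ) (h : α → List β)
    (xs : List α) (st : σ) :
    pvEFold (fun st x => pvEFold (g x) (h x) st) xs st =
      pvEFold (fun st p => g p.1 st p.2) (xs.flatMap (fun x => (h x).map (fun y => (x, y)))) st := by
  induction xs generalizing st with
  | nil => rfl
  | cons x xs ih =>
    simp only [pvEFold, List.flatMap_cons, pvEFold_append, pvEFold_mapList]
    cases pvEFold (g x) (h x) st with
    | error n => rfl
    | ok s' => exact ih s'

theorem pvGetD_set_ne (l : List Int) (i k : Nat) (h : k ≠ i) (a : Int) :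
    (l.set i a).getD k 0 = l.getD k 0 := by
  simp [List.getD, List.getElem?_set_ne (Ne.symm h)]

-- a non-erroring counter step leaves every counter unchanged or off 5,
-- and the two counters it checked are off 5
theorem pvBStep_ok (pb : List (List String)) (s : String) (out : Int) (p : Nat × Nat)
    (st st' : List Int × List Int) (h : pvBStep pb s out p.1 p.2 st = .ok st') :
    pvNF st' p ∧ pvPres st st' := by
  obtain ⟨r, c⟩ := st
  simp only [pvBStep] at h
  by_cases hm : (pb.getD p.1 []).getD p.2 "" = s
  · rw [if_pos hm] at h
    by_cases hc : ((r.set p.1 (r.getD p.1 0 + 1)).getD p.1 0 = 5 ∨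
        (c.set p.2 (c.getD p.2 0 + 1)).getD p.2 0 = 5)
    · rw [if_pos hc] at h; cases h
    · rw [if_neg hc] at h
      cases h
      push Not at hc
      refine ⟨⟨hc.1, hc.2⟩, ?_⟩
      intro k
      constructor
      · by_cases hk : k = p.1
        · subst hk; exact Or.inr hc.1
        · exact Or.inl (pvGetD_set_ne _ _ _ hk _)
      · by_cases hk : k = p.2
        · subst hk; exact Or.inr hc.2
        · exact Or.inl (pvGetD_set_ne _ _ _ hk _)
  · rw [if_neg hm] at h
    by_cases hc : (r.getD p.1 0 = 5 ∨ c.getD p.2 0 = 5)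
    · rw [if_pos hc] at h; cases h
    · rw [if_neg hc] at h; cases h
      push Not at hc
      exact ⟨⟨hc.1, hc.2⟩, pvPres_refl _⟩

theorem pvMark_ok (num : Int) (p : Nat × Nat) (st st' : List Int × List Int)
    (h : pvMark num st p = .ok st') : pvNF st' p ∧ pvPres st st' := by
  obtain ⟨r, c⟩ := st
  simp only [pvMark] at h
  by_cases hc : ((r.set p.1 (r.getD p.1 0 + 1)).getD p.1 0 = 5 ∨
      (c.set p.2 (c.getD p.2 0 + 1)).getD p.2 0 = 5)
  · rw [if_pos hc] at h; cases h
  · rw [if_neg hc] at h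
    cases h
    push Not at hc
    refine ⟨⟨hc.1, hc.2⟩, ?_⟩
    intro k
    constructor
    · by_cases hk : k = p.1
      · subst hk; exact Or.inr hc.1
      · exact Or.inl (pvGetD_set_ne _ _ _ hk _)
    · by_cases hk : k = p.2
      · subst hk; exact Or.inr hc.2
      · exact Or.inl (pvGetD_set_ne _ _ _ hk _)

-- after a completed pass, every visited cell's counters are off 5
theorem pvEFold_post {α : Type} (f : (List Int × List Int) → α → Except Int (List Int × List Int))
    (P : α → Nat × Nat)
    (hstep : ∀ s x s', f s x = .ok s' → pvNF s' (P x) ∧ pvPres s s')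
    (L : List α) (s s' : List Int × List Int) (h : pvEFold f L s = .ok s') :
    (∀ x ∈ L, pvNF s' (P x)) ∧ pvPres s s' := by
  induction L generalizing s with
  | nil =>
    simp only [pvEFold] at h; cases h
    exact ⟨by simp, pvPres_refl _⟩
  | cons x xs ih =>
    simp only [pvEFold] at h
    cases hx : f s x with
    | error n => rw [hx] at h; cases h
    | ok s1 =>
      rw [hx] at h
      rcases hstep s x s1 hx with ⟨hnf1, hpres1⟩
      rcases ih s1 h with ⟨hall, hpres2⟩
      refine ⟨?_, pvPres_trans hpres1 hpres2⟩
      intro y hy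
      rcases List.mem_cons.mp hy with rfl | hy
      · exact pvNF_of_pres hnf1 hpres2
      · exact hall y hy

-- on a 5-free state the counter scan only has to touch the matching cells
theorem pvEFold_filter (pb : List (List String)) (s : String) (out : Int)
    (L : List (Nat × Nat)) (st : List Int × List Int)
    (hnf : ∀ p ∈ L, pvNF st p) :
    pvEFold (fun st p => pvBStep pb s out p.1 p.2 st) L st =
      pvEFold (pvMark out)
        (L.filter (fun p => decide ((pb.getD p.1 []).getD p.2 "" = s))) st := by
  induction L generalizing st with
  | nil => rfl
  | cons p ps ih =>
    by_cases hm : (pb.getD p.1 []).getD p.2 "" = s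
    · have hstep : pvBStep pb s out p.1 p.2 st = pvMark out st p := by
        simp only [pvBStep, pvMark, if_pos hm]
      have hf : (p :: ps).filter (fun p => decide ((pb.getD p.1 []).getD p.2 "" = s)) =
          p :: ps.filter (fun p => decide ((pb.getD p.1 []).getD p.2 "" = s)) := by
        have hm' : (pb[p.1]?.getD [])[p.2]?.getD "" = s := by simpa [List.getD] using hm
        simp [hm']
      rw [hf]
      simp only [pvEFold, hstep]
      cases hmk : pvMark out st p with
      | error n => rfl
      | ok st1 =>
        exact ih st1 (fun q hq => pvNF_of_pres (hnf q (List.mem_cons_of_mem _ hq))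
          (pvMark_ok out p st st1 hmk).2)
    · have hns : pvBStep pb s out p.1 p.2 st = .ok st := by
        simp only [pvBStep, if_neg hm]
        rw [if_neg]
        rintro (h | h)
        · exact (hnf p (List.mem_cons_self)).1 h
        · exact (hnf p (List.mem_cons_self)).2 h
      have hf : (p :: ps).filter (fun p => decide ((pb.getD p.1 []).getD p.2 "" = s)) =
          ps.filter (fun p => decide ((pb.getD p.1 []).getD p.2 "" = s)) := by
        have hm' : ¬ (pb[p.1]?.getD [])[p.2]?.getD "" = s := by simpa [List.getD] using hm
        simp [hm']
      rw [hf]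
      simp only [pvEFold, hns]
      exact ih st (fun q hq => hnf q (List.mem_cons_of_mem _ hq))

theorem pvFoldl_flat {σ α β : Type} (g : α → σ → β → σ) (h : α → List β)
    (xs : List α) (d0 : σ) :
    xs.foldl (fun d x => (h x).foldl (g x) d) d0 =
      (xs.flatMap (fun x => (h x).map (fun y => (x, y)))).foldl (fun d p => g p.1 d p.2) d0 := by
  induction xs generalizing d0 with
  | nil => rfl
  | cons x xs ih =>
    simp only [List.foldl_cons, List.flatMap_cons, List.foldl_append, List.foldl_map]
    rw [ih]

-- the dict built by B holds, under each value, its cells in A's visiting order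
theorem pvBuildPos_getD (pb : List (List String)) (v : String) :
    (pvBuildPos pb).getD v [] =
      (pvCells pb).filter (fun p => decide ((pb.getD p.1 []).getD p.2 "" = v)) := by
  have h1 : pvBuildPos pb =
      ((pvCells pb).map (fun p => (((pb.getD p.1 []).getD p.2 ""), p))).foldl
        (fun d q => d.modify q.1 [] (· ++ [q.2])) PySem.Dict.empty := by
    unfold pvBuildPos pvCells
    rw [pvFoldl_flat (fun i (d : PySem.Dict String (List (Nat × Nat))) j =>
          d.modify ((pb.getD i []).getD j "") [] (· ++ [(i, j)]))
        (fun i => List.range (pb.getD i []).length) (List.range pb.length) PySem.Dict.empty,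
      List.foldl_map]
  rw [h1, PySem.Dict.getD_foldl_modify_append]
  rw [List.filter_map, List.map_map]
  simp only [Function.comp_def, List.map_id_fun', id]
  exact List.filter_congr (fun x _ => by
    by_cases h : (pb[x.1]?.getD [])[x.2]?.getD "" = v <;> simp [h])

-- one whole pass of A over the board, lengths taken, is the counter scan over the cell list
theorem pvPass_map (pb : List (List String)) (num : Int)
    (st : List (List Int) × List (List Int)) :
    (pvAPass pb num st).map pvF =
      pvEFold (fun s p => pvBStep pb (PySem.Int.toStr num) num p.1 p.2 s) (pvCells pb) (pvF st) := by
  unfold pvAPass pvCells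
  rw [pvEFold_map pvF _
      (fun s i => pvEFold (fun s j => pvBStep pb (PySem.Int.toStr num) num i j s)
        (List.range (pb.getD i []).length) s)
      (fun s i => pvEFold_map pvF _ _ (fun s' j => pvStep_map pb num i j s')
        (List.range (pb.getD i []).length) s)]
  exact pvEFold_flat (fun i s j => pvBStep pb (PySem.Int.toStr num) num i j s)
    (fun i => List.range (pb.getD i []).length) (List.range pb.length) (pvF st)

-- A's passes, lengths taken, are exactly B's dict-driven marking
theorem pvChain (pb : List (List String)) (nums : List Int)
    (STA : List (List Int) × List (List Int))
    (hnf : ∀ p ∈ pvCells pb, pvNF (pvF STA) p) :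
    (pvEFold (fun st num => pvAPass pb num st) nums STA).map pvF =
      pvEFold (fun st num =>
          pvEFold (pvMark num) ((pvBuildPos pb).getD (PySem.Int.toStr num) []) st)
        nums (pvF STA) := by
  induction nums generalizing STA with
  | nil => rfl
  | cons num rest ih =>
    have hpass := pvPass_map pb num STA
    have hmatch : pvEFold (fun s p => pvBStep pb (PySem.Int.toStr num) num p.1 p.2 s)
        (pvCells pb) (pvF STA) =
        pvEFold (pvMark num) ((pvBuildPos pb).getD (PySem.Int.toStr num) []) (pvF STA) := by
      rw [pvEFold_filter pb (PySem.Int.toStr num) num (pvCells pb) (pvF STA) hnf,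
        pvBuildPos_getD]
    simp only [pvEFold]
    cases hA : pvAPass pb num STA with
    | error n =>
      rw [hA] at hpass
      simp only [Except.map] at hpass
      rw [← hmatch, ← hpass]
      rfl
    | ok STA' =>
      rw [hA] at hpass
      simp only [Except.map] at hpass
      rw [← hmatch, ← hpass]
      have hnf' : ∀ p ∈ pvCells pb, pvNF (pvF STA') p := by
        have hpost := pvEFold_post
          (fun s p => pvBStep pb (PySem.Int.toStr num) num p.1 p.2 s) id
          (fun s x s' hx => pvBStep_ok pb (PySem.Int.toStr num) num x s s' hx)
          (pvCells pb) (pvF STA) (pvF STA') (by rw [← hpass])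
        exact hpost.1
      exact ih STA' hnf'

-- Pre_ gives the initial invariant: no counter a visited cell looks at sits at 5
theorem pvPre_nf (pb : List (List String)) (rsb csb : List (List Int))
    (hpre : Pre_scoring pb rsb csb) :
    ∀ p ∈ pvCells pb, pvNF (pvF (rsb, csb)) p := by
  intro p hp
  unfold pvCells at hp
  simp only [List.mem_flatMap, List.mem_map, List.mem_range] at hp
  obtain ⟨i, hi, j, hj, rfl⟩ := hp
  rcases hpre i hi with ⟨hrow, _, hcol⟩
  have hne : pb.getD i [] ≠ [] := by
    intro h; rw [h] at hj; exact Nat.not_lt_zero _ hj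
  constructor
  · show (pvF (rsb, csb)).1.getD i 0 ≠ 5
    rw [show (pvF (rsb, csb)).1 = rsb.map (fun r => (r.length : Int)) from rfl, pvGetD_mapLen]
    exact_mod_cast (hrow hne).2
  · show (pvF (rsb, csb)).2.getD j 0 ≠ 5
    rw [show (pvF (rsb, csb)).2 = csb.map (fun c => (c.length : Int)) from rfl, pvGetD_mapLen]
    exact_mod_cast hcol j hj

-- ===== VERDICT (by name: the statement is the Claim_ definition above) =====
theorem scoring_spec : Claim_equal_scoring := by
  intro pb rsb csb _hdom hpre
  unfold Spec_scoring scoring scoring_alt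
  have hc := pvChain pb pvCalled (rsb, csb) (pvPre_nf pb rsb csb hpre)
  cases hR : pvEFold (fun st num => pvAPass pb num st) pvCalled (rsb, csb) with
  | error n =>
    rw [hR] at hc
    simp only [Except.map] at hc
    show some n =
      (match pvEFold (fun st num =>
          pvEFold (pvMark num) ((pvBuildPos pb).getD (PySem.Int.toStr num) []) st)
        pvCalled (pvF (rsb, csb)) with
       | .error n => some n
       | .ok _ => none)
    rw [← hc]
  | ok ST =>
    rw [hR] at hc
    simp only [Except.map] at hc
    show none =
      (match pvEFold (fun st num =>
          pvEFold (pvMark num) ((pvBuildPos pb).getD (PySem.Int.toStr num) []) st)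
        pvCalled (pvF (rsb, csb)) with
       | .error n => some n
       | .ok _ => none)
    rw [← hc]
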